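-- pv_equiv track=rewrite | github.com/Intelligent-CAT-Lab/SEER | utils.py | is_method_sig_format
-- ===== SOURCE A (Python) =====
-- def is_method_sig_format(statement):
--     """
--         this function determines whether the given statement is a method signature or not
--     """
--     tokens = statement.split()
--     keywords = ['public', 'private', 'protected', 'static', 'final', 'native', 'synchronized',
--                'abstract', 'transient']
--
--     if tokens == []:
--         return 1
--
--     if tokens[0] in keywords:
--         curly_bracket = False
--         opening_parenthesis = False
--         closing_parenthesis = False
--
--         for char in statement:
--             if char == ';' or char == '=':
--                 return 1
--             if char == '{':
--                 curly_bracket = True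
--                 break
--             elif char == '(':
--                 opening_parenthesis = True
--             elif char == ')':
--                 closing_parenthesis = True
--
--         if curly_bracket and opening_parenthesis and closing_parenthesis:
--             return 2
--         elif curly_bracket and not opening_parenthesis and not closing_parenthesis:
--             return 1
--         elif curly_bracket and not opening_parenthesis and closing_parenthesis:
--             return 1
--         else:
--             return 3
--
--     return 1
-- ===== SOURCE B (Python) =====
-- def is_method_sig_format(statement):
--     tokens = statement.split()
--     if not tokens:
--         return 1
--     keywords = ('public', 'private', 'protected', 'static', 'final', 'native',
--                 'synchronized', 'abstract', 'transient')
--     if tokens[0] not in keywords: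
--         return 1
--     idx = statement.find('{')
--     prefix = statement if idx == -1 else statement[:idx]
--     if ';' in prefix or '=' in prefix:
--         return 1
--     if idx == -1:
--         return 3
--     has_open = '(' in prefix
--     has_close = ')' in prefix
--     if has_open and has_close:
--         return 2
--     if not has_open:
--         return 1
--     return 3
-- ===== Notes on version B (the rewrite author's own statement) =====
-- stated objective: idiomatic
-- what changed: Replaced the early-breaking character-by-character state-machine loop by a find-then-slice decomposition: compute the prefix before the first opening brace once and decide with plain substring membership tests on it.
import Mathlib
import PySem

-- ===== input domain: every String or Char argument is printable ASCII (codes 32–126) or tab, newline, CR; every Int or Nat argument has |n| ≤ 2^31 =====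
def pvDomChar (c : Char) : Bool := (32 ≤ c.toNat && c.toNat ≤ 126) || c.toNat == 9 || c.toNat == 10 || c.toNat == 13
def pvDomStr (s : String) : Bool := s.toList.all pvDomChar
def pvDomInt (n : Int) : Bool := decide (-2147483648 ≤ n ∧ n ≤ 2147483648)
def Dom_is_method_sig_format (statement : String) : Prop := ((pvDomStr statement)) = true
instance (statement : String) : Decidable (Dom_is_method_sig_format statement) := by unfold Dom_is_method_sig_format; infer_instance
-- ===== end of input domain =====

-- B replaces A's early-breaking character loop by find('{')+slice and substring membership tests (idiomatic decomposition).

-- ===== PORT A =====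
def aKeywords : List String :=
  ["public", "private", "protected", "static", "final", "native", "synchronized",
   "abstract", "transient"]

-- the post-loop decision table of A (also reached via the '{' break)
def aDecide (curly op cl : Bool) : Int :=
  if curly && op && cl then 2
  else if curly && !op && !cl then 1
  else if curly && !op && cl then 1
  else 3

-- A's for-loop over the characters, with its early returns and break
def aScan : List Char → Bool → Bool → Int
  | [], op, cl => aDecide false op cl
  | c :: rest, op, cl =>
    if c = ';' ∨ c = '=' then 1
    else if c = '{' then aDecide true op cl
    else if c = '(' then aScan rest true cl
    else if c = ')' then aScan rest op true
    else aScan rest op cl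

def is_method_sig_format (statement : String) : Int :=
  match PySem.Str.split₀ statement with
  | [] => 1
  | t :: _ =>
    if aKeywords.contains t then aScan statement.toList false false
    else 1

-- ===== PORT B =====
-- B uses the same keyword table (a shared constant, not shared logic)
def is_method_sig_format_alt (statement : String) : Int :=
  match PySem.Str.split₀ statement with
  | [] => 1
  | t :: _ =>
    if !(aKeywords.contains t) then 1
    else
      let idx := PySem.Str.find statement "{"
      let pre := if idx = -1 then statement else PySem.Str.slice statement none (some idx)
      if PySem.Str.isIn ";" pre || PySem.Str.isIn "=" pre then 1
      else if idx = -1 then 3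
      else
        let hasOpen := PySem.Str.isIn "(" pre
        let hasClose := PySem.Str.isIn ")" pre
        if hasOpen && hasClose then 2
        else if !hasOpen then 1
        else 3

-- ===== PRECONDITION & SPEC =====
def Spec_is_method_sig_format (statement : String) (out : Int) : Prop := out = is_method_sig_format_alt statement
instance (statement : String) (out : Int) : Decidable (Spec_is_method_sig_format statement out) := by unfold Spec_is_method_sig_format; infer_instance

-- ===== CLAIM (what is proved, stated in full; the proofs are below) =====
def Claim_equal_is_method_sig_format : Prop := ∀ (statement : String), Dom_is_method_sig_format statement → Spec_is_method_sig_format statement (is_method_sig_format statement)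

-- ===== LEMMAS AND PROOFS =====

-- a singleton is a substring iff the character occurs
lemma isIn_singleton (c : Char) (p : List Char) :
    PySem.Chars.isIn [c] p = p.contains c := by
  by_cases h : c ∈ p
  · have : [c] <:+: p := by
      obtain ⟨s, t, rfl⟩ := List.append_of_mem h
      exact ⟨s, t, by simp⟩
    simp [(PySem.Chars.isIn_iff_infix _ _).mpr this, h]
  · have : ¬ [c] <:+: p := fun hin => h (hin.mem (List.mem_singleton_self c))
    simp [(PySem.Chars.isIn_eq_false_iff _ _).mpr this, h]

-- characterisation of A's scan loop: membership in the prefix before the first '{'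
lemma aScan_eq (cs : List Char) (op cl : Bool) :
    aScan cs op cl =
      (let p := cs.takeWhile (fun c => c ≠ '{')
       if p.contains ';' || p.contains '=' then 1
       else if cs.contains '{' then
         (if (op || p.contains '(') && (cl || p.contains ')') then 2
          else if !(op || p.contains '(') then 1 else 3)
       else 3) := by
  induction cs generalizing op cl with
  | nil => simp [aScan, aDecide]
  | cons c rest ih =>
    simp only [aScan]
    by_cases h1 : c = ';' ∨ c = '='
    · rcases h1 with rfl | rfl <;> simp [List.takeWhile_cons]
    · push_neg at h1
      obtain ⟨hs, he⟩ := h1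
      by_cases h2 : c = '{'
      · subst h2
        simp [aDecide, List.takeWhile_cons]
        cases op <;> cases cl <;> simp
      · by_cases h3 : c = '('
        · subst h3
          rw [if_neg (by simp [hs, he]), if_neg (by simp), if_pos rfl, ih]
          simp [List.takeWhile_cons, hs.symm, he.symm]
        · by_cases h4 : c = ')'
          · subst h4
            rw [if_neg (by simp [hs, he]), if_neg (by simp), if_neg (by simp), if_pos rfl, ih]
            simp [List.takeWhile_cons, hs.symm, he.symm]
          · rw [if_neg (by simp [hs, he]), if_neg h2, if_neg h3, if_neg h4, ih]
            simp [List.takeWhile_cons, h2, hs, he, h3, h4, List.mem_cons, Ne.symm hs, Ne.symm he, Ne.symm h3, Ne.symm h4, Ne.symm h2]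

-- if a ∉ cs then takeWhile (≠ a) keeps everything
lemma takeWhile_of_not_mem (cs : List Char) (a : Char) (h : a ∉ cs) :
    cs.takeWhile (fun c => c ≠ a) = cs := by
  induction cs with
  | nil => rfl
  | cons c rest ih =>
    simp only [List.mem_cons, not_or] at h
    rw [List.takeWhile_cons, if_pos (by simp [Ne.symm h.1]), ih h.2]

-- take up to the first occurrence of a is takeWhile (≠ a)
lemma take_eq_takeWhile (cs : List Char) (a : Char) (n : Nat)
    (hmem : [a] <+: cs.drop n) (hmin : ∀ i < n, ¬ [a] <+: cs.drop i) :
    cs.take n = cs.takeWhile (fun c => c ≠ a) := by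
  induction cs generalizing n with
  | nil => simp at hmem
  | cons c rest ih =>
    cases n with
    | zero =>
      simp only [List.drop_zero] at hmem
      obtain ⟨t, ht⟩ := hmem
      simp at ht
      simp [ht.1]
    | succ m =>
      have hc : c ≠ a := by
        intro h'
        exact hmin 0 (Nat.succ_pos m) (by simp [h'])
      simp only [List.drop_succ_cons] at hmem
      rw [List.take_succ_cons, List.takeWhile_cons, if_pos (by simp [hc]),
        ih m hmem (fun i hi => by simpa using hmin (i + 1) (Nat.succ_lt_succ hi))]

-- ===== VERDICT (by name: the statement is the Claim_ definition above) =====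
theorem is_method_sig_format_spec : Claim_equal_is_method_sig_format := by
  intro statement _
  unfold Spec_is_method_sig_format is_method_sig_format is_method_sig_format_alt
  cases hsplit : PySem.Str.split₀ statement with
  | nil => rfl
  | cons t rest =>
    by_cases hk : aKeywords.contains t
    · simp only [hk, Bool.not_true, Bool.false_eq_true, if_false, if_true]
      rw [aScan_eq]
      have h1 : (";" : String).toList = [';'] := rfl
      have h2 : ("=" : String).toList = ['='] := rfl
      have h3 : ("(" : String).toList = ['('] := rfl
      have h4 : (")" : String).toList = [')'] := rfl
      have h5 : ("{" : String).toList = ['{'] := rfl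
      have hfe : PySem.Str.find statement "{" = PySem.Chars.find statement.toList ['{'] := by
        rw [PySem.Str.find_eq, h5]
      by_cases hidx : PySem.Str.find statement "{" = -1
      · -- no '{' in the statement
        have hidx' : PySem.Chars.find statement.toList ['{'] = -1 := by rw [← hfe]; exact hidx
        have hnotmem : '{' ∉ statement.toList := by
          intro hm
          refine absurd ((PySem.Chars.find_eq_neg_one_iff _ _).mp hidx') ?_
          simp only [not_not]
          obtain ⟨u, v, huv⟩ := List.append_of_mem hm
          exact ⟨u, v, by rw [huv]; simp⟩
        rw [if_pos hidx, if_pos hidx]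
        rw [takeWhile_of_not_mem statement.toList '{' hnotmem]
        simp only [PySem.Str.isIn, h1, h2]
        rw [isIn_singleton, isIn_singleton]
        simp [List.contains_eq_mem, hnotmem]
      · -- '{' occurs; the prefix before it is takeWhile (≠ '{')
        have hge : 0 ≤ PySem.Chars.find statement.toList ['{'] := by
          have := PySem.Chars.neg_one_le_find statement.toList ['{']
          rw [hfe] at hidx
          omega
        obtain ⟨hpre, hmin⟩ := PySem.Chars.find_spec (s := statement.toList) (sub := ['{']) hge
        have hmem : '{' ∈ statement.toList :=
          List.mem_of_mem_drop (hpre.mem (List.mem_singleton_self '{'))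
        have hp : (PySem.Str.slice statement none (some (PySem.Str.find statement "{"))).toList
            = statement.toList.takeWhile (fun c => c ≠ '{') := by
          rw [hfe, PySem.Str.toList_slice, PySem.Chars.slice_eq_listSlice,
            PySem.List.slice_to _ hge]
          exact take_eq_takeWhile statement.toList '{' _ hpre hmin
        rw [if_neg hidx, if_neg hidx]
        simp only [PySem.Str.isIn, hp, h1, h2, h3, h4]
        rw [isIn_singleton, isIn_singleton, isIn_singleton, isIn_singleton]
        simp [List.contains_eq_mem, hmem]
    · have hb : aKeywords.contains t = false := by simpa using hk
      simp only [hb, Bool.not_false, if_true, Bool.false_eq_true, if_false]
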